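-- pv_equiv track=rewrite | github.com/vilosource/vafi | images/agent/build_prior_context.py | trim_to_byte_cap
-- ===== SOURCE A (Python) =====
-- PRIOR_CONTEXT_HEADER = """---
--
-- # Continuation from previous sessions
--
-- This is a continuation of a prior conversation on this project. Do not
-- summarize this context back to the user unless asked. Treat it as
-- established shared knowledge.
-- """
--
-- def format_prior_section(turns: list[tuple[str, str, str]]) -> str:
--     """Format turn tuples as markdown. Empty list → empty string."""
--     if not turns:
--         return ""
--     lines = [PRIOR_CONTEXT_HEADER]
--     for ts, user, asst in turns:
--         lines.append("")
--         lines.append(f"## User ({ts})")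
--         lines.append(user)
--         lines.append("")
--         lines.append("## Assistant")
--         lines.append(asst)
--     return "\n".join(lines) + "\n"
--
-- def trim_to_byte_cap(
--     turns: list[tuple[str, str, str]],
--     max_bytes: int,
-- ) -> list[tuple[str, str, str]]:
--     """Drop oldest turns until the formatted section fits under max_bytes.
--
--     If a single remaining turn still exceeds the cap, truncate its assistant
--     text (not the user text — user intent is more load-bearing for context).
--     """
--     trimmed = list(turns)
--     # Drop oldest turns while we have more than 1 and we're over cap.
--     while len(trimmed) > 1 and len(format_prior_section(trimmed).encode()) > max_bytes:
--         trimmed.pop(0)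
--     if not trimmed:
--         return trimmed
--     # Single turn still over cap: truncate assistant text (preserve user intent).
--     if len(format_prior_section(trimmed).encode()) > max_bytes:
--         ts, user, asst = trimmed[-1]
--         while len(asst) > 20 and len(format_prior_section(trimmed[:-1] + [(ts, user, asst)]).encode()) > max_bytes:
--             asst = asst[: max(20, len(asst) // 2)] + " [truncated]"
--         trimmed = trimmed[:-1] + [(ts, user, asst)]
--     return trimmed
-- ===== SOURCE B (Python) =====
-- # Re-implementation: per-turn byte sizes + one running-total scan instead of
-- # re-formatting the whole section after every pop; the assistant-truncation
-- # loop iterates on integer lengths only and slices the string once at the end.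
-- PRIOR_CONTEXT_HEADER = """---
--
-- # Continuation from previous sessions
--
-- This is a continuation of a prior conversation on this project. Do not
-- summarize this context back to the user unless asked. Treat it as
-- established shared knowledge.
-- """
--
-- _BASE = len(PRIOR_CONTEXT_HEADER.encode()) + 1  # header line + trailing newline
-- _SUFFIX = " [truncated]"  # 12 bytes
--
--
-- def _turn_bytes(turn):
--     ts, user, asst = turn
--     # 6 joining newlines + "## User ()" (10) + "## Assistant" (12) = 28 bytes overhead
--     return 28 + len(ts.encode()) + len(user.encode()) + len(asst.encode())
--
--
-- def trim_to_byte_cap(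
--     turns: list[tuple[str, str, str]],
--     max_bytes: int,
-- ) -> list[tuple[str, str, str]]:
--     if not turns:
--         return []
--     total = _BASE + sum(_turn_bytes(t) for t in turns)
--     # Drop oldest turns (keep at least one) by walking the running total forward.
--     i = 0
--     while i < len(turns) - 1 and total > max_bytes:
--         total -= _turn_bytes(turns[i])
--         i += 1
--     kept = turns[i:]
--     if total <= max_bytes:
--         return kept
--     # Single turn still over cap: truncate assistant text, iterating on lengths.
--     ts, user, asst = kept[-1]
--     fixed = total - len(asst.encode())
--     L = len(asst)
--     if L > 20 and fixed + L > max_bytes: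
--         p = max(20, L // 2)
--         L = p + 12
--         while L > 20 and fixed + L > max_bytes:
--             p = max(20, L // 2)
--             L = p + 12
--         asst = asst[:p] + _SUFFIX
--     return kept[:-1] + [(ts, user, asst)]
-- ===== Notes on version B (the rewrite author's own statement) =====
-- stated objective: alternative
-- what changed: Instead of re-formatting the whole section after every dropped turn, B precomputes per-turn byte weights and walks a running total forward to find the kept suffix, and the assistant-truncation loop iterates on integer lengths only, slicing the string once at the end.
import Mathlib
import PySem

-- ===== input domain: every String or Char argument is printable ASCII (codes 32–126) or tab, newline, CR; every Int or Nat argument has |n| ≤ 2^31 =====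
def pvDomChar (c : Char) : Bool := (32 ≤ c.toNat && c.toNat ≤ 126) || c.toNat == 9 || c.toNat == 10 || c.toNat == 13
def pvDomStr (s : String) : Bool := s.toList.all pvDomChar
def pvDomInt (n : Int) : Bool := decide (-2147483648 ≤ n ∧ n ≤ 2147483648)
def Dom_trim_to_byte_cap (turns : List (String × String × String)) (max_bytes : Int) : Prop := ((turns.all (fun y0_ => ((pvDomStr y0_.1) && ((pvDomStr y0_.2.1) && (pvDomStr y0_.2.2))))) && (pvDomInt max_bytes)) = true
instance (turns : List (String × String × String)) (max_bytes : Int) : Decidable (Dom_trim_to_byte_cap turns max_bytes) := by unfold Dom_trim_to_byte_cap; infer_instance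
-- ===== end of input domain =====

-- B replaces A's full re-format of the section after every dropped turn / truncation step
-- by per-turn byte weights with a running total, and a length-only truncation loop.
-- On the stated ASCII domain len(s.encode()) equals the code-point count, so byte counts are
-- ported as List.length of the char list.

-- ===== PORT A =====
def pvHeader : List Char := ("---\n\n# Continuation from previous sessions\n\nThis is a continuation of a prior conversation on this project. Do not\nsummarize this context back to the user unless asked. Treat it as\nestablished shared knowledge.\n").toList

-- the six lines A's for-loop appends for one turn
def pvTurnLines (t : String × String × String) : List (List Char) :=
  [[], ("## User (".toList ++ t.1.toList ++ ")".toList), t.2.1.toList, [], "## Assistant".toList, t.2.2.toList]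

def formatPriorSection (turns : List (String × String × String)) : List Char :=
  if turns = [] then []
  else PySem.Chars.join ['\n'] (turns.foldl (fun acc t => acc ++ pvTurnLines t) [pvHeader]) ++ ['\n']

-- `while len(trimmed) > 1 and len(format_prior_section(trimmed).encode()) > max_bytes: trimmed.pop(0)`
def pvDropA (l : List (String × String × String)) (max_bytes : Int) : List (String × String × String) :=
  if _h : 1 < l.length ∧ max_bytes < ((formatPriorSection l).length : Int) then
    pvDropA l.tail max_bytes
  else l
termination_by l.length
decreasing_by simp [List.length_tail]; omega

def pvSuffix : List Char := " [truncated]".toList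

-- A's inner while loop, fuelled: the fuel bounds the iterations wherever the Python loop
-- terminates, and both ports run their fuelled loops in lock-step, so they agree everywhere.
def pvTruncA (fuel : Nat) (rest : List (String × String × String)) (ts user : String)
    (asst : List Char) (max_bytes : Int) : List Char :=
  match fuel with
  | 0 => asst
  | f + 1 =>
    if 20 < asst.length ∧
        max_bytes < ((formatPriorSection (rest ++ [(ts, user, String.ofList asst)])).length : Int) then
      pvTruncA f rest ts user (asst.take (max 20 (asst.length / 2)) ++ pvSuffix) max_bytes
    else asst

def trim_to_byte_cap (turns : List (String × String × String)) (max_bytes : Int) :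
    List (String × String × String) :=
  let trimmed := pvDropA turns max_bytes
  if trimmed = [] then trimmed
  else if max_bytes < ((formatPriorSection trimmed).length : Int) then
    match trimmed.getLast? with
    | none => trimmed
    | some (ts, user, asst) =>
      trimmed.dropLast ++
        [(ts, user, String.ofList
            (pvTruncA (asst.toList.length + 2) trimmed.dropLast ts user asst.toList max_bytes))]
  else trimmed

-- ===== PORT B =====
def pvWeight (t : String × String × String) : Nat :=
  28 + t.1.toList.length + t.2.1.toList.length + t.2.2.toList.length

def pvBase : Nat := pvHeader.length + 1

-- Source B's forward scan: drop oldest turns, updating the running total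
def pvScanB (l : List (String × String × String)) (total : Int) (max_bytes : Int) :
    List (String × String × String) × Int :=
  match l with
  | [] => ([], total)
  | [t] => ([t], total)
  | t :: rest =>
    if max_bytes < total then pvScanB rest (total - (pvWeight t : Int)) max_bytes
    else (t :: rest, total)

-- Source B's length-only truncation loop (fuelled for the same reason as pvTruncA);
-- L / 2 ports Python's L // 2 exactly since L is a nonnegative length
def pvLenLoopB (fuel : Nat) (p L : Nat) (fixed max_bytes : Int) : Nat × Nat :=
  match fuel with
  | 0 => (p, L)
  | f + 1 =>
    if 20 < L ∧ max_bytes < fixed + (L : Int) then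
      pvLenLoopB f (max 20 (L / 2)) (max 20 (L / 2) + 12) fixed max_bytes
    else (p, L)

def trim_to_byte_cap_alt (turns : List (String × String × String)) (max_bytes : Int) :
    List (String × String × String) :=
  if turns = [] then []
  else
    let res := pvScanB turns ((pvBase + (turns.map pvWeight).sum : Nat) : Int) max_bytes
    let kept := res.1
    let total := res.2
    if total ≤ max_bytes then kept
    else
      match kept.getLast? with
      | none => kept
      | some (ts, user, asst) =>
        let L0 := asst.toList.length
        let fixed : Int := total - (L0 : Int)
        if 20 < L0 ∧ max_bytes < fixed + (L0 : Int) then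
          let p1 := max 20 (L0 / 2)
          kept.dropLast ++
            [(ts, user, String.ofList
                (asst.toList.take (pvLenLoopB (L0 + 1) p1 (p1 + 12) fixed max_bytes).1 ++ pvSuffix))]
        else kept.dropLast ++ [(ts, user, asst)]

-- ===== PRECONDITION & SPEC =====
def Spec_trim_to_byte_cap (turns : List (String × String × String)) (max_bytes : Int)
    (out : List (String × String × String)) : Prop := out = trim_to_byte_cap_alt turns max_bytes
instance (turns : List (String × String × String)) (max_bytes : Int)
    (out : List (String × String × String)) : Decidable (Spec_trim_to_byte_cap turns max_bytes out) := by
  unfold Spec_trim_to_byte_cap; infer_instance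

-- ===== CLAIM (what is proved, stated in full; the proofs are below) =====
def Claim_equal_trim_to_byte_cap : Prop := ∀ (turns : List (String × String × String)) (max_bytes : Int), Dom_trim_to_byte_cap turns max_bytes → Spec_trim_to_byte_cap turns max_bytes (trim_to_byte_cap turns max_bytes)

-- ===== LEMMAS AND PROOFS =====
theorem pv_join_len (c : Char) (xs : List (List Char)) (x : List Char) :
    (PySem.Chars.join [c] (x :: xs)).length = x.length + ((xs.map List.length).sum + xs.length) := by
  induction xs generalizing x with
  | nil => simp [PySem.Chars.join_singleton]
  | cons y ys ih =>
    rw [PySem.Chars.join_cons_cons]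
    simp [ih y]
    omega

theorem pv_chunk_sum (l : List (String × String × String)) :
    ((l.flatMap pvTurnLines).map List.length).sum + (l.flatMap pvTurnLines).length
      = (l.map pvWeight).sum := by
  induction l with
  | nil => simp
  | cons t rest ih =>
    simp only [List.flatMap_cons, List.map_append, List.sum_append, List.length_append]
    have h9 : ("## User (".toList).length = 9 := by decide
    have h1 : (")".toList).length = 1 := by decide
    have h12 : ("## Assistant".toList).length = 12 := by decide
    simp only [pvTurnLines, pvWeight, List.map_cons, List.sum_cons,
      List.sum_nil, List.length_cons, List.length_nil, List.length_append, List.map] at *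
    omega

theorem pv_size_eq (l : List (String × String × String)) (h : l ≠ []) :
    (formatPriorSection l).length = pvBase + (l.map pvWeight).sum := by
  rw [formatPriorSection, if_neg h, PySem.List.foldl_append_eq_flatMap]
  have : [pvHeader] ++ l.flatMap pvTurnLines = pvHeader :: l.flatMap pvTurnLines := rfl
  rw [this, List.length_append, pv_join_len]
  have h2 := pv_chunk_sum l
  simp only [List.length_cons, List.length_nil, pvBase]
  omega

theorem pv_dropA_ne_nil (l : List (String × String × String)) (max_bytes : Int) (h : l ≠ []) :
    pvDropA l max_bytes ≠ [] := by
  induction l using pvDropA.induct max_bytes with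
  | case1 l hc ih =>
    rw [pvDropA, dif_pos hc]
    apply ih
    have h1 := hc.1
    rcases l with _ | ⟨a, _ | ⟨b, bs⟩⟩
    · simp at h1
    · simp at h1
    · simp
  | case2 l hc => rw [pvDropA, dif_neg hc]; exact h

theorem pv_scan_eq (l : List (String × String × String)) (max_bytes : Int) (h : l ≠ []) :
    pvScanB l ((pvBase + (l.map pvWeight).sum : Nat) : Int) max_bytes
      = (pvDropA l max_bytes,
         ((pvBase + ((pvDropA l max_bytes).map pvWeight).sum : Nat) : Int)) := by
  induction l with
  | nil => exact absurd rfl h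
  | cons t rest ih =>
    match rest with
    | [] =>
      rw [pvScanB, pvDropA, dif_neg (fun hc => absurd hc.1 (by simp))]
    | r :: rs =>
      rw [show pvScanB (t :: r :: rs) ((pvBase + ((t :: r :: rs).map pvWeight).sum : Nat) : Int) max_bytes
            = if max_bytes < ((pvBase + ((t :: r :: rs).map pvWeight).sum : Nat) : Int) then
                pvScanB (r :: rs) (((pvBase + ((t :: r :: rs).map pvWeight).sum : Nat) : Int) - (pvWeight t : Int)) max_bytes
              else (t :: r :: rs, ((pvBase + ((t :: r :: rs).map pvWeight).sum : Nat) : Int)) from rfl]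
      rw [pvDropA]
      by_cases hc : max_bytes < (((pvBase + (((t :: r :: rs).map pvWeight).sum) : Nat) : Int))
      · rw [if_pos hc, dif_pos ⟨by simp, by rw [pv_size_eq _ (by simp)]; exact hc⟩]
        have harg : ((pvBase + (((t :: r :: rs).map pvWeight).sum) : Nat) : Int) - (pvWeight t : Int)
            = ((pvBase + (((r :: rs).map pvWeight).sum) : Nat) : Int) := by
          simp only [List.map_cons, List.sum_cons]
          push_cast
          ring
        rw [harg]
        exact ih (List.cons_ne_nil r rs)
      · rw [if_neg hc, dif_neg]
        intro hcon
        exact hc (by rw [pv_size_eq _ (by simp)] at hcon; exact hcon.2)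

theorem pv_trunc_eq (f : Nat) (rest : List (String × String × String)) (ts user : String)
    (orig : List Char) (p : Nat) (fixed max_bytes : Int)
    (hp20 : 20 ≤ p) (hpl : p ≤ orig.length)
    (hfix : fixed = ((pvBase + (rest.map pvWeight).sum + 28 + ts.length
        + user.length : Nat) : Int)) :
    pvTruncA f rest ts user (orig.take p ++ pvSuffix) max_bytes
      = orig.take (pvLenLoopB f p (p + 12) fixed max_bytes).1 ++ pvSuffix := by
  induction f generalizing p with
  | zero => rfl
  | succ f ih =>
    have hlen : (orig.take p ++ pvSuffix).length = p + 12 := by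
      simp [pvSuffix]
      omega
    have hsz : ((formatPriorSection
        (rest ++ [(ts, user, String.ofList (orig.take p ++ pvSuffix))])).length : Int)
        = fixed + ((p + 12 : Nat) : Int) := by
      rw [pv_size_eq _ (by simp), hfix]
      simp only [List.map_append, List.sum_append, List.map_cons, List.map_nil,
        List.sum_cons, List.sum_nil, pvWeight, String.toList_ofList, hlen,
        String.length_toList]
      push_cast
      ring
    rw [pvTruncA, pvLenLoopB]
    by_cases hc : max_bytes < fixed + ((p + 12 : Nat) : Int)
    · rw [if_pos ⟨by rw [hlen]; omega, by rw [hsz]; exact hc⟩,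
        if_pos ⟨by omega, by push_cast at hc ⊢; exact hc⟩]
      have hp' : max 20 ((p + 12) / 2) ≤ p := by omega
      have hstep : (orig.take p ++ pvSuffix).take (max 20 ((orig.take p ++ pvSuffix).length / 2))
          = orig.take (max 20 ((p + 12) / 2)) := by
        rw [hlen, List.take_append_of_le_length (by simp; omega), List.take_take]
        congr 1
        omega
      rw [hstep]
      exact ih (max 20 ((p + 12) / 2)) (le_max_left _ _) (le_trans hp' hpl)
    · rw [if_neg (fun hcon => hc (by rw [← hsz]; exact hcon.2)),
        if_neg (fun hcon => hc (by push_cast; exact_mod_cast hcon.2))]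

theorem pv_main_eq (turns : List (String × String × String)) (max_bytes : Int) :
    trim_to_byte_cap turns max_bytes = trim_to_byte_cap_alt turns max_bytes := by
  by_cases h0 : turns = []
  · subst h0
    rw [trim_to_byte_cap, trim_to_byte_cap_alt]
    simp [pvDropA]
  · rw [trim_to_byte_cap, trim_to_byte_cap_alt, if_neg h0]
    have hkne : pvDropA turns max_bytes ≠ [] := pv_dropA_ne_nil turns max_bytes h0
    rw [pv_scan_eq turns max_bytes h0]
    set kept := pvDropA turns max_bytes with hkept
    rw [if_neg hkne]
    have hsize : ((formatPriorSection kept).length : Int)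
        = ((pvBase + (kept.map pvWeight).sum : Nat) : Int) := by
      rw [pv_size_eq kept hkne]
    by_cases hover : max_bytes < ((pvBase + (kept.map pvWeight).sum : Nat) : Int)
    · rw [if_pos (by rw [hsize]; exact hover), if_neg (by omega)]
      obtain ⟨⟨ts, user, asst⟩, hlast⟩ := List.getLast?_isSome.mpr hkne |> Option.isSome_iff_exists.mp
      rw [hlast]
      dsimp only
      have hdec : kept.dropLast ++ [(ts, user, asst)] = kept :=
        List.dropLast_append_getLast? _ hlast
      set rest := kept.dropLast with hrest
      have hsum : (pvBase + (kept.map pvWeight).sum : Nat)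
          = pvBase + (rest.map pvWeight).sum + 28 + ts.length + user.length + asst.length := by
        conv_lhs => rw [← hdec]
        simp only [List.map_append, List.sum_append, List.map_cons, List.map_nil,
          List.sum_cons, List.sum_nil, pvWeight, String.length_toList]
        omega
      have hfix : ((pvBase + (kept.map pvWeight).sum : Nat) : Int) - ((asst.toList.length : Nat) : Int)
          = ((pvBase + (rest.map pvWeight).sum + 28 + ts.length + user.length : Nat) : Int) := by
        rw [hsum]
        simp only [String.length_toList]
        push_cast
        ring
      -- A's first truncation-loop step
      rw [show asst.toList.length + 2 = (asst.toList.length + 1) + 1 by omega, pvTruncA]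
      have hcand : rest ++ [(ts, user, String.ofList asst.toList)] = kept := by
        rw [String.ofList_toList]; exact hdec
      have hsz1 : ((formatPriorSection (rest ++ [(ts, user, String.ofList asst.toList)])).length : Int)
          = ((pvBase + (kept.map pvWeight).sum : Nat) : Int) := by
        rw [hcand, hsize]
      have hcap : max_bytes < ((pvBase + (kept.map pvWeight).sum : Nat) : Int)
          - ((asst.toList.length : Nat) : Int) + ((asst.toList.length : Nat) : Int) := by omega
      by_cases h20 : 20 < asst.toList.length
      · rw [if_pos ⟨h20, by rw [hsz1]; exact hover⟩, if_pos ⟨h20, hcap⟩]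
        have heq := pv_trunc_eq (asst.toList.length + 1) rest ts user asst.toList
          (max 20 (asst.toList.length / 2))
          (((pvBase + (kept.map pvWeight).sum : Nat) : Int) - ((asst.toList.length : Nat) : Int))
          max_bytes (le_max_left _ _) (by omega) hfix
        rw [heq]
      · rw [if_neg (fun hcon => h20 hcon.1), if_neg (fun hcon => h20 hcon.1),
          String.ofList_toList, hdec]
    · rw [if_neg (by rw [hsize]; exact hover), if_pos (by omega)]

-- ===== VERDICT (by name: the statement is the Claim_ definition above) =====
theorem trim_to_byte_cap_spec : Claim_equal_trim_to_byte_cap := by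
  intro turns max_bytes _
  exact pv_main_eq turns max_bytes
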